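-- pv_equiv track=rewrite | github.com/DuduMalta/Lista-de-Exercicios-2024 | Lista de Exercicios/Matrizes/Exercicio4.py | encontrar_maior_valor
-- ===== SOURCE A (Python) =====
-- def encontrar_maior_valor(matriz):
--     maior_valor = matriz[0][0]
--     localizacao = (0, 0)
--
--     for i in range(len(matriz)):
--         for j in range(len(matriz[0])):
--             if matriz[i][j] > maior_valor:
--                 maior_valor = matriz[i][j]
--                 localizacao = (i, j)
--
--     return localizacao
-- ===== SOURCE B (Python) =====
-- def encontrar_maior_valor(matriz):
--     cols = len(matriz[0])
--     best = None  # (row_max, i, j_of_first_max)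
--     for i, row in enumerate(matriz):
--         m, jm = row[0], 0
--         for j in range(1, cols):
--             if row[j] > m:
--                 m, jm = row[j], j
--         if best is None or m > best[0]:
--             best = (m, i, jm)
--     return (best[1], best[2])
-- ===== Notes on version B (the rewrite author's own statement) =====
-- stated objective: alternative
-- what changed: B computes each row's local maximum with the column of its first occurrence in an inner reduce, then selects across rows with a strict comparison (earliest row wins ties), instead of A's single running-best scan indexing the whole matrix.
import Mathlib
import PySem

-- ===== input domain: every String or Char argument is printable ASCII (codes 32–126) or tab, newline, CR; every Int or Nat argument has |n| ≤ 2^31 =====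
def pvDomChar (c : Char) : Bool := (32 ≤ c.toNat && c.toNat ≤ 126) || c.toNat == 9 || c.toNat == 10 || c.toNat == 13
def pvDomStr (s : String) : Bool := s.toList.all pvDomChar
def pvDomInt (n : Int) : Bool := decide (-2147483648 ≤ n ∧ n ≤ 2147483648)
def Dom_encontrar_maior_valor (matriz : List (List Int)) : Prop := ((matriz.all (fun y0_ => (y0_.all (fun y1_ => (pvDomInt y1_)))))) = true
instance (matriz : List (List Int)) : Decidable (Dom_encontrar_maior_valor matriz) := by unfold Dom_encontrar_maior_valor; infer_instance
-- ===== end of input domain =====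

-- B replaces A's single running-best scan by a per-row local-maximum reduce followed by a
-- strict selection across rows (alternative decomposition, same cost).


-- ===== PORT A =====
-- literal transliteration of A: running best (maior_valor, localizacao) over i in range(len(matriz)),
-- j in range(len(matriz[0])); matriz[i][j] via pyGetD (in range under Pre_).
def encontrar_maior_valor (matriz : List (List Int)) : Int × Int :=
  let maior0 : Int := PySem.List.pyGetD (PySem.List.pyGetD matriz 0 []) 0 0
  let st :=
    (PySem.List.pyRange 0 (matriz.length : Int) 1).foldl
      (fun (st : Int × (Int × Int)) i =>
        (PySem.List.pyRange 0 ((PySem.List.pyGetD matriz 0 []).length : Int) 1).foldl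
          (fun (st : Int × (Int × Int)) j =>
            if PySem.List.pyGetD (PySem.List.pyGetD matriz i []) j 0 > st.1 then
              (PySem.List.pyGetD (PySem.List.pyGetD matriz i []) j 0, (i, j))
            else st)
          st)
      (maior0, ((0 : Int), (0 : Int)))
  st.2

-- ===== PORT B =====
-- Source B's inner loop: row's max and column of its first occurrence, scanning j in range(1, cols)
def pvRowMax (row : List Int) (cols : Int) : Int × Int :=
  (PySem.List.pyRange 1 cols 1).foldl
    (fun (st : Int × Int) j =>
      if PySem.List.pyGetD row j 0 > st.1 then (PySem.List.pyGetD row j 0, j) else st)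
    (PySem.List.pyGetD row 0 0, 0)

-- Source B's outer loop: select across enumerate(matriz) with strict >
def encontrar_maior_valor_alt (matriz : List (List Int)) : Int × Int :=
  let cols : Int := ((PySem.List.pyGetD matriz 0 []).length : Int)
  let best :=
    (PySem.List.enumerate matriz 0).foldl
      (fun (best : Option (Int × Int × Int)) p =>
        let mj := pvRowMax p.2 cols
        match best with
        | none => some (mj.1, p.1, mj.2)
        | some b => if mj.1 > b.1 then some (mj.1, p.1, mj.2) else some b)
      none
  match best with
  | some b => (b.2.1, b.2.2)
  | none => (0, 0)

-- ===== PRECONDITION & SPEC =====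
-- Pre_ excludes exactly the inputs where Python A raises IndexError: the empty matrix, an empty
-- first row, and ragged matrices with some row shorter than the first row.
def Pre_encontrar_maior_valor (matriz : List (List Int)) : Prop :=
  matriz ≠ [] ∧ 0 < (matriz.headD []).length ∧
    ∀ row ∈ matriz, (matriz.headD []).length ≤ row.length
instance (matriz : List (List Int)) : Decidable (Pre_encontrar_maior_valor matriz) := by
  unfold Pre_encontrar_maior_valor; infer_instance
def pvWitness_encontrar_maior_valor : List (List Int) := [[1, 5], [7, 2]]
def Spec_encontrar_maior_valor (matriz : List (List Int)) (out : Int × Int) : Prop := out = encontrar_maior_valor_alt matriz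
instance (matriz : List (List Int)) (out : Int × Int) : Decidable (Spec_encontrar_maior_valor matriz out) := by unfold Spec_encontrar_maior_valor; infer_instance

-- ===== CLAIM (what is proved, stated in full; the proofs are below) =====
def Claim_equal_encontrar_maior_valor : Prop := ∀ (matriz : List (List Int)), Dom_encontrar_maior_valor matriz → Pre_encontrar_maior_valor matriz → Spec_encontrar_maior_valor matriz (encontrar_maior_valor matriz)

-- ===== LEMMAS AND PROOFS =====
-- A's inner-loop body, specialised to a fixed row and row index
def pvFA (row : List Int) (i : Int) : (Int × (Int × Int)) → Int → (Int × (Int × Int)) :=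
  fun st j => if PySem.List.pyGetD row j 0 > st.1 then (PySem.List.pyGetD row j 0, (i, j)) else st

-- B's inner-loop body
def pvFB (row : List Int) : (Int × Int) → Int → (Int × Int) :=
  fun st j => if PySem.List.pyGetD row j 0 > st.1 then (PySem.List.pyGetD row j 0, j) else st

-- B's outer-loop body, rows looked up by index
def pvGB (matriz : List (List Int)) (cols : Int) :
    Option (Int × Int × Int) → Int → Option (Int × Int × Int) :=
  fun best i =>
    let mj := pvRowMax (PySem.List.pyGetD matriz i []) cols
    match best with
    | none => some (mj.1, i, mj.2)
    | some b => if mj.1 > b.1 then some (mj.1, i, mj.2) else some b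

def pvConv : Option (Int × Int × Int) → Int × (Int × Int)
  | some b => (b.1, (b.2.1, b.2.2))
  | none => (0, (0, 0))

lemma pvRowMax_eq (row : List Int) (cols : Int) :
    pvRowMax row cols
      = List.foldl (pvFB row) (PySem.List.pyGetD row 0 0, 0) (PySem.List.pyRange 1 cols 1) := rfl

-- invariant linking A's inner scan (running best with location) to B's row-local scan
lemma pv_inner_inv (row : List Int) (i : Int) (l : List Int) :
    ∀ (mg jg : Int) (m0 : Int) (L0 : Int × Int),
      List.foldl (pvFA row i) (if mg > m0 then (mg, (i, jg)) else (m0, L0)) l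
        = (let s := List.foldl (pvFB row) (mg, jg) l
           if s.1 > m0 then (s.1, (i, s.2)) else (m0, L0)) := by
  induction l with
  | nil => intro mg jg m0 L0; simp
  | cons j l ih =>
    intro mg jg m0 L0
    have hstep : pvFA row i (if mg > m0 then (mg, (i, jg)) else (m0, L0)) j
        = (if (pvFB row (mg, jg) j).1 > m0
            then ((pvFB row (mg, jg) j).1, (i, (pvFB row (mg, jg) j).2)) else (m0, L0)) := by
      simp only [pvFA, pvFB]
      split_ifs <;> first | rfl | (exfalso; simp_all; omega)
    simp only [List.foldl_cons, hstep]
    have := ih (pvFB row (mg, jg) j).1 (pvFB row (mg, jg) j).2 m0 L0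
    simpa using this

-- B's row scan never decreases its running value, and keeps (m, j) when the value stays m
lemma pv_rowfold_ge (row : List Int) (l : List Int) :
    ∀ (m j : Int),
      m ≤ (List.foldl (pvFB row) (m, j) l).1 ∧
      ((List.foldl (pvFB row) (m, j) l).1 = m → List.foldl (pvFB row) (m, j) l = (m, j)) := by
  induction l with
  | nil => intro m j; simp
  | cons x l ih =>
    intro m j
    by_cases h : PySem.List.pyGetD row x 0 > m
    · have := ih (PySem.List.pyGetD row x 0) x
      constructor
      · simp only [List.foldl_cons, pvFB, if_pos h]; omega
      · intro he
        exfalso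
        simp only [List.foldl_cons, pvFB, if_pos h] at he
        omega
    · simpa [List.foldl_cons, pvFB, if_neg h] using ih m j

-- A's full inner loop over range(cols) computed from B's row-local maximum
lemma pv_inner_full (row : List Int) (i : Int) (cols : Int) (hc : 0 < cols)
    (M : Int) (L : Int × Int) :
    List.foldl (pvFA row i) (M, L) (PySem.List.pyRange 0 cols 1)
      = (if (pvRowMax row cols).1 > M
          then ((pvRowMax row cols).1, (i, (pvRowMax row cols).2)) else (M, L)) := by
  rw [PySem.List.pyRange_one_cons (by omega : (0:Int) < cols)]
  simp only [List.foldl_cons]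
  have h0 : pvFA row i (M, L) 0
      = (if PySem.List.pyGetD row 0 0 > M then (PySem.List.pyGetD row 0 0, (i, (0:Int))) else (M, L)) := by
    simp [pvFA]
  rw [h0]
  have := pv_inner_inv row i (PySem.List.pyRange (0+1) cols 1) (PySem.List.pyGetD row 0 0) 0 M L
  simpa [pvRowMax, pvFB] using this

-- the two outer loops agree step for step once both carry a (value, i, j) best triple
lemma pv_outer (matriz : List (List Int)) (cols : Int) (hc : 0 < cols) (l : List Int) :
    ∀ (b : Int × Int × Int),
      List.foldl (fun st i => List.foldl (pvFA (PySem.List.pyGetD matriz i []) i) st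
          (PySem.List.pyRange 0 cols 1)) (pvConv (some b)) l
        = pvConv (List.foldl (pvGB matriz cols) (some b) l) := by
  induction l with
  | nil => intro b; rfl
  | cons i l ih =>
    intro b
    simp only [List.foldl_cons]
    rw [show (pvConv (some b)) = ((b.1, (b.2.1, b.2.2)) : Int × (Int × Int)) from rfl,
        pv_inner_full _ i cols hc]
    have hg : pvGB matriz cols (some b) i
        = (if (pvRowMax (PySem.List.pyGetD matriz i []) cols).1 > b.1
            then some ((pvRowMax (PySem.List.pyGetD matriz i []) cols).1, i,
                       (pvRowMax (PySem.List.pyGetD matriz i []) cols).2)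
            else some b) := rfl
    rw [hg]
    split_ifs with h
    · simpa [pvConv] using ih ((pvRowMax (PySem.List.pyGetD matriz i []) cols).1, i,
        (pvRowMax (PySem.List.pyGetD matriz i []) cols).2)
    · simpa [pvConv] using ih b

-- ===== VERDICT (by name: the statement is the Claim_ definition above) =====
theorem encontrar_maior_valor_spec : Claim_equal_encontrar_maior_valor := by
  intro matriz _ hpre
  obtain ⟨hne, hc0, -⟩ := hpre
  cases matriz with
  | nil => exact absurd rfl hne
  | cons r rs =>
    unfold Spec_encontrar_maior_valor
    have hrow0 : PySem.List.pyGetD (r :: rs) 0 ([] : List Int) = r :=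
      PySem.List.pyGetD_zero_cons r rs []
    have hcols : (0 : Int) < (r.length : Int) := by
      simp only [List.headD_cons] at hc0; exact_mod_cast hc0
    -- both ports as folds over range(len) with the shared bodies
    have hA : encontrar_maior_valor (r :: rs)
        = (List.foldl
            (fun st i => List.foldl (pvFA (PySem.List.pyGetD (r :: rs) i []) i) st
              (PySem.List.pyRange 0 ((PySem.List.pyGetD (r :: rs) 0 []).length : Int) 1))
            (PySem.List.pyGetD (PySem.List.pyGetD (r :: rs) 0 []) 0 0, ((0:Int), (0:Int)))
            (PySem.List.pyRange 0 ((r :: rs).length : Int) 1)).2 := rfl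
    have hB : encontrar_maior_valor_alt (r :: rs)
        = (match List.foldl (pvGB (r :: rs) ((PySem.List.pyGetD (r :: rs) 0 []).length : Int))
              none (PySem.List.pyRange 0 ((r :: rs).length : Int) 1) with
           | some b => ((b.2.1 : Int), (b.2.2 : Int))
           | none => ((0:Int), (0:Int))) := by
      simp only [encontrar_maior_valor_alt,
        PySem.List.enumerate_eq_map_pyRange (r :: rs) ([] : List Int), List.foldl_map]
      rfl
    rw [hA, hB, hrow0]
    have hlen : (0 : Int) < ((r :: rs).length : Int) := by
      simp only [List.length_cons]; positivity
    rw [PySem.List.pyRange_one_cons hlen]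
    simp only [List.foldl_cons]
    -- the first step lands both sides on the triple (row-0 max, 0, its column)
    have hS := pv_rowfold_ge r (PySem.List.pyRange 1 (r.length : Int) 1)
      (PySem.List.pyGetD r 0 0) 0
    have hfirstA :
        List.foldl (pvFA (PySem.List.pyGetD (r :: rs) 0 []) 0)
            (PySem.List.pyGetD r 0 0, ((0:Int), (0:Int)))
            (PySem.List.pyRange 0 (r.length : Int) 1)
          = pvConv (some ((pvRowMax r (r.length : Int)).1, 0, (pvRowMax r (r.length : Int)).2)) := by
      rw [hrow0, pv_inner_full r 0 (r.length : Int) hcols]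
      split_ifs with h
      · rfl
      · rw [pvRowMax_eq] at h ⊢
        have h1 := hS.1
        have heq : (List.foldl (pvFB r)
            (PySem.List.pyGetD r 0 0, 0) (PySem.List.pyRange 1 (r.length : Int) 1)).1
            = PySem.List.pyGetD r 0 0 := by omega
        rw [hS.2 heq]
        rfl
    have hfirstB : pvGB (r :: rs) ((r.length : Int)) none 0
        = some ((pvRowMax r (r.length : Int)).1, 0, (pvRowMax r (r.length : Int)).2) := by
      simp [pvGB, hrow0]
    rw [hfirstA, hfirstB, pv_outer (r :: rs) (r.length : Int) hcols]
    cases List.foldl (pvGB (r :: rs) (r.length : Int))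
        (some ((pvRowMax r (r.length : Int)).1, 0, (pvRowMax r (r.length : Int)).2))
        (PySem.List.pyRange (0+1) ((r :: rs).length : Int) 1) with
    | none => rfl
    | some b => rfl
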